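-- pv_equiv track=rewrite | github.com/legofanclub/advent-of-code-2023 | day 14/q1/code.py | moveRockColumn
-- ===== SOURCE A (Python) =====
-- def moveRockColumn(column):
--     lastRock = -1
--     numRocks = 0
--     res = []
--     for i, v in enumerate(column):
--         if v == "#":
--             prevLastRock = lastRock
--             lastRock = i
--             for j in range(prevLastRock, lastRock-1):
--                 if numRocks > 0:
--                     res.append("O")
--                 else:
--                     res.append(".")
--                 numRocks -= 1
--             res.append("#")
--             numRocks = 0
--         elif v == "O":
--             numRocks += 1
--
--     # edge
--     for j in range(lastRock, len(column) - 1):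
--         if numRocks > 0:
--             res.append("O")
--         else:
--             res.append(".")
--         numRocks -= 1
--     numRocks = 0
--
--     return "".join(res)
-- ===== SOURCE B (Python) =====
-- def moveRockColumn(column):
--     parts = []
--     for seg in column.split("#"):
--         n = seg.count("O")
--         parts.append("O" * n + "." * (len(seg) - n))
--     return "#".join(parts)
-- ===== Notes on version B (the rewrite author's own statement) =====
-- stated objective: simpler
-- what changed: Replaces A's index/counter-driven fill loops keyed on the position of the last cube rock by splitting the column on the cube-rock separator, rewriting each segment as its round-rock count followed by dots, and rejoining the segments.
import Mathlib
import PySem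

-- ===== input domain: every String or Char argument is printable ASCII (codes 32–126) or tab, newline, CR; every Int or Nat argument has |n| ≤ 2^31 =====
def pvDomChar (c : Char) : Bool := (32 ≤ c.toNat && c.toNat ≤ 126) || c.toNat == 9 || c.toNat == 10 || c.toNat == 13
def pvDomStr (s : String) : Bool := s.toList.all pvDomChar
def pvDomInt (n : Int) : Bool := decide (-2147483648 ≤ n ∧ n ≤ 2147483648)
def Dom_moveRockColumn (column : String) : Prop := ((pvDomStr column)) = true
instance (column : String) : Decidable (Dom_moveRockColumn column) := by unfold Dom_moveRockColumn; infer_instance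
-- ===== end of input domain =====

-- B replaces A's counter-driven positional fill with split-on-'#' / per-segment rewrite / rejoin (simpler decomposition; a timing run measured it faster by a constant factor).

-- ===== PORT A =====
-- the 'for j in range(a, b): res.append("O" if numRocks>0 else "."); numRocks -= 1' loop of A
def pvFill (a b numRocks : Int) (res : List String) : Int × List String :=
  (PySem.List.pyRange a b 1).foldl
    (fun p _ => (p.1 - 1, p.2 ++ [if p.1 > 0 then "O" else "."])) (numRocks, res)

-- one iteration of A's 'for i, v in enumerate(column)' loop; state = (lastRock, numRocks, res)
def pvStepA (st : Int × Int × List String) (iv : Int × Char) : Int × Int × List String :=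
  if iv.2 = '#' then
    let f := pvFill st.1 (iv.1 - 1) st.2.1 st.2.2
    (iv.1, 0, f.2 ++ ["#"])
  else if iv.2 = 'O' then (st.1, st.2.1 + 1, st.2.2)
  else st

def moveRockColumn (column : String) : String :=
  let st := (PySem.List.enumerate column.toList 0).foldl pvStepA (-1, 0, [])
  let f := pvFill st.1 (PySem.Str.len column - 1) st.2.1 st.2.2
  PySem.Str.join "" f.2

-- ===== PORT B =====
def moveRockColumn_alt (column : String) : String :=
  let segs := (PySem.Str.split? column "#").getD []
  let parts := segs.map (fun seg =>
    let n := PySem.Str.count seg "O"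
    String.ofList (List.replicate n 'O' ++ List.replicate (seg.toList.length - n) '.'))
  PySem.Str.join "#" parts

-- ===== PRECONDITION & SPEC =====
def Spec_moveRockColumn (column : String) (out : String) : Prop := out = moveRockColumn_alt column
instance (column : String) (out : String) : Decidable (Spec_moveRockColumn column out) := by unfold Spec_moveRockColumn; infer_instance

-- ===== CLAIM (what is proved, stated in full; the proofs are below) =====
def Claim_equal_moveRockColumn : Prop := ∀ (column : String), Dom_moveRockColumn column → Spec_moveRockColumn column (moveRockColumn column)

-- ===== LEMMAS AND PROOFS =====

-- splitting a char list on '#', structurally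
def pvSplit : List Char → List (List Char)
  | [] => [[]]
  | c :: t => if c = '#' then [] :: pvSplit t else (pvSplit t).modifyHead (c :: ·)

-- how one segment is rewritten
def pvSeg (seg : List Char) : List Char :=
  List.replicate (seg.count 'O') 'O' ++ List.replicate (seg.length - seg.count 'O') '.'

theorem pvSplit_ne_nil (l : List Char) : pvSplit l ≠ [] := by
  induction l with
  | nil => simp [pvSplit]
  | cons c t ih =>
    simp only [pvSplit]
    split_ifs
    · simp
    · cases h : pvSplit t with
      | nil => exact absurd h ih
      | cons a b => simp [List.modifyHead]

theorem pvCountGo (sub : List Char) :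
    ∀ (fuel : Nat) (l : List Char) (acc : Nat), l.length ≤ fuel → sub = ['O'] →
      PySem.Chars.count.go sub fuel l acc = acc + l.count 'O' := by
  intro fuel
  induction fuel with
  | zero =>
    intro l acc hl _
    have : l = [] := List.eq_nil_of_length_eq_zero (Nat.le_zero.mp hl)
    subst this; simp [PySem.Chars.count.go]
  | succ n ih =>
    intro l acc hl hsub
    cases l with
    | nil => simp [PySem.Chars.count.go]
    | cons c t =>
      subst hsub
      rw [PySem.Chars.count.go]
      by_cases hc : c = 'O'
      · subst hc
        have hp : List.isPrefixOf ['O'] ('O' :: t) = true := by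
          simp [List.isPrefixOf]
        simp only [hp, if_true, List.length, List.drop]
        rw [ih t (acc + 1) (by simpa using Nat.lt_succ_iff.mp (Nat.lt_of_lt_of_le (Nat.lt_succ_self _) (by simpa using hl))) rfl]
        simp [List.count_cons]
        omega
      · have hp : List.isPrefixOf ['O'] (c :: t) = false := by
          simp [List.isPrefixOf]
          intro h; exact absurd h.symm hc
        simp only [hp, Bool.false_eq_true, if_false]
        rw [ih t acc (by simpa using Nat.succ_le_succ_iff.mp hl) rfl]
        simp [List.count_cons, hc]

theorem pvCount_char (l : List Char) : PySem.Chars.count l ['O'] = l.count 'O' := by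
  rw [PySem.Chars.count]
  simp only [List.isEmpty]
  exact (pvCountGo ['O'] l.length l 0 le_rfl rfl).trans (by simp)

theorem pvSplitGo :
    ∀ (fuel : Nat) (l cur : List Char) (acc : List (List Char)), l.length ≤ fuel →
      PySem.Chars.splitOn.go ['#'] fuel l cur acc =
        acc.reverse ++ (pvSplit l).modifyHead (cur.reverse ++ ·) := by
  intro fuel
  induction fuel with
  | zero =>
    intro l cur acc hl
    have : l = [] := List.eq_nil_of_length_eq_zero (Nat.le_zero.mp hl)
    subst this
    simp [PySem.Chars.splitOn.go, pvSplit, List.modifyHead]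
  | succ n ih =>
    intro l cur acc hl
    cases l with
    | nil => simp [PySem.Chars.splitOn.go, pvSplit, List.modifyHead]
    | cons c t =>
      rw [PySem.Chars.splitOn.go]
      by_cases hc : c = '#'
      · subst hc
        have hp : List.isPrefixOf ['#'] ('#' :: t) = true := by simp [List.isPrefixOf]
        simp only [hp, if_true, List.length, List.drop]
        rw [ih t [] (cur.reverse :: acc) (by simpa using Nat.succ_le_succ_iff.mp hl)]
        simp [pvSplit, List.modifyHead]
        cases h : pvSplit t with
        | nil => exact absurd h (pvSplit_ne_nil t)
        | cons a b => simp [List.modifyHead]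
      · have hp : List.isPrefixOf ['#'] (c :: t) = false := by
          simp [List.isPrefixOf]
          intro h; exact absurd h.symm hc
        simp only [hp, Bool.false_eq_true, if_false]
        rw [ih t (c :: cur) acc (by simpa using Nat.succ_le_succ_iff.mp hl)]
        simp only [pvSplit, hc, if_false]
        cases h : pvSplit t with
        | nil => exact absurd h (pvSplit_ne_nil t)
        | cons a b => simp [List.modifyHead]

theorem pvSplitOn_eq (l : List Char) : PySem.Chars.splitOn l ['#'] = pvSplit l := by
  rw [PySem.Chars.splitOn]
  rw [pvSplitGo (l.length + 1) l [] [] (Nat.le_succ _)]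
  cases h : pvSplit l with
  | nil => exact absurd h (pvSplit_ne_nil l)
  | cons a b => simp [List.modifyHead]

-- flattened characters of the accumulated result strings
def pvChars (res : List String) : List Char := (res.map String.toList).flatten

theorem pvFill_chars (l : List Int) :
    ∀ (n : Int) (res : List String),
      pvChars ((l.foldl (fun p _ => (p.1 - 1, p.2 ++ [if p.1 > 0 then "O" else "."])) (n, res)).2) =
        pvChars res ++ List.replicate (min n.toNat l.length) 'O' ++
          List.replicate (l.length - n.toNat) '.' := by
  induction l with
  | nil => intro n res; simp
  | cons x t ih =>
    intro n res
    simp only [List.foldl_cons]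
    rw [ih]
    by_cases hn : n > 0
    · have h1 : min n.toNat (t.length + 1) = (min (n - 1).toNat t.length) + 1 := by omega
      have h2 : t.length + 1 - n.toNat = t.length - (n - 1).toNat := by omega
      simp only [hn, if_true, pvChars, List.map_append, List.flatten_append, List.length_cons,
        h1, h2]
      simp [List.replicate_succ]
    · have h0 : n.toNat = 0 := by omega
      have h0' : (n - 1).toNat = 0 := by omega
      simp only [hn, if_false, pvChars, List.map_append, List.flatten_append, List.length_cons,
        h0, h0']
      simp [List.replicate_succ]

theorem pvFill_chars' (a b n : Int) (res : List String) :
    pvChars (pvFill a b n res).2 =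
      pvChars res ++ List.replicate (min n.toNat (b - a).toNat) 'O' ++
        List.replicate ((b - a).toNat - n.toNat) '.' := by
  rw [pvFill, pvFill_chars]
  simp [PySem.List.length_pyRange_one]

theorem pvIntercalate_cons {α : Type} (sep x : List α) (y : List α) (ys : List (List α)) :
    List.intercalate sep (x :: y :: ys) = x ++ sep ++ List.intercalate sep (y :: ys) := by
  simp [List.intercalate, List.intersperse]

def pvRun (t : List Char) (i lastRock numRocks : Int) (res : List String) : List Char :=
  let st := (PySem.List.enumerate t i).foldl pvStepA (lastRock, numRocks, res)
  pvChars (pvFill st.1 (i + t.length - 1) st.2.1 st.2.2).2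

theorem pvModifyHead_nil {α : Type} (L : List (List α)) :
    L.modifyHead (fun x => [] ++ x) = L := by cases L <;> simp

theorem pvSplit_nil : pvSplit [] = [[]] := rfl
theorem pvSplit_hash (t : List Char) : pvSplit ('#' :: t) = [] :: pvSplit t := by simp [pvSplit]
theorem pvSplit_cons (c : Char) (t : List Char) (h : ¬ c = '#') :
    pvSplit (c :: t) = (pvSplit t).modifyHead (c :: ·) := by simp [pvSplit, h]

theorem pvMainA (t : List Char) :
    ∀ (seg : List Char) (i : Int) (res : List String),
      pvRun t i (i - 1 - seg.length) (seg.count 'O') res =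
        pvChars res ++ List.intercalate ['#'] (((pvSplit t).modifyHead (seg ++ ·)).map pvSeg) := by
  induction t with
  | nil =>
    intro seg i res
    simp only [pvRun, PySem.List.enumerate_nil, List.foldl_nil, List.length_nil]
    rw [pvFill_chars']
    have hle : seg.count 'O' ≤ seg.length := List.count_le_length
    rw [pvSplit_nil]
    simp only [List.modifyHead, List.map_cons, List.map_nil, List.append_nil,
      List.intercalate, List.intersperse, List.flatten, pvSeg]
    rw [List.append_assoc]
    have h1 : min ((seg.count 'O' : Int)).toNat (i + ((0:Nat):Int) - 1 - (i - 1 - (seg.length : Int))).toNat = seg.count 'O' := by omega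
    have h2 : (i + ((0:Nat):Int) - 1 - (i - 1 - (seg.length : Int))).toNat - ((seg.count 'O' : Int)).toNat = seg.length - seg.count 'O' := by omega
    rw [h1, h2]
    simp
  | cons c t' ih =>
    intro seg i res
    simp only [pvRun, PySem.List.enumerate_cons, List.foldl_cons, List.length_cons]
    by_cases hc : c = '#'
    · subst hc
      have hstep : pvStepA (i - 1 - (seg.length : Int), (seg.count 'O' : Int), res) (i, '#') =
          (i, 0, (pvFill (i - 1 - (seg.length : Int)) (i - 1) (seg.count 'O') res).2 ++ ["#"]) := by
        simp [pvStepA]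
      rw [hstep]
      push_cast
      have hb : i + ((t'.length : Int) + 1) - 1 = (i + 1) + t'.length - 1 := by ring
      rw [hb]
      have hinit : ((i : Int), (0 : Int),
            (pvFill (i - 1 - (seg.length : Int)) (i - 1) (seg.count 'O') res).2 ++ ["#"]) =
          ((i + 1) - 1 - (([] : List Char).length : Int), ((([] : List Char).count 'O' : Nat) : Int),
            (pvFill (i - 1 - (seg.length : Int)) (i - 1) (seg.count 'O') res).2 ++ ["#"]) := by
        simp
      rw [hinit]
      have hrec := ih [] (i + 1) ((pvFill (i - 1 - (seg.length : Int)) (i - 1) (seg.count 'O') res).2 ++ ["#"])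
      simp only [pvRun] at hrec
      rw [hrec, pvModifyHead_nil]
      have hfill : pvChars ((pvFill (i - 1 - (seg.length : Int)) (i - 1) (seg.count 'O') res).2 ++ ["#"]) =
          pvChars res ++ pvSeg seg ++ ['#'] := by
        simp only [pvChars, List.map_append, List.flatten_append]
        rw [show (((pvFill (i - 1 - (seg.length : Int)) (i - 1) (seg.count 'O') res).2.map String.toList).flatten : List Char) = pvChars (pvFill (i - 1 - (seg.length : Int)) (i - 1) (seg.count 'O') res).2 from rfl]
        rw [pvFill_chars']
        have h1 : min ((seg.count 'O' : Int)).toNat ((i - 1 - (i - 1 - (seg.length : Int)))).toNat = seg.count 'O' := by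
          have := List.count_le_length (l := seg) (a := 'O'); omega
        have h2 : ((i - 1 - (i - 1 - (seg.length : Int)))).toNat - ((seg.count 'O' : Int)).toNat = seg.length - seg.count 'O' := by omega
        rw [h1, h2, pvSeg]
        simp [pvChars, List.append_assoc]
      rw [hfill]
      rw [pvSplit_hash]
      simp only [List.modifyHead, List.map_cons]
      cases h : (pvSplit t').map pvSeg with
      | nil => exact absurd (List.map_eq_nil_iff.mp h) (pvSplit_ne_nil t')
      | cons a2 b2 =>
        rw [pvIntercalate_cons]
        simp [List.append_assoc]
    · -- non-'#' character: it joins the current segment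
      have hstep : pvStepA (i - 1 - (seg.length : Int), (seg.count 'O' : Int), res) (i, c) =
          ((i + 1) - 1 - (((seg ++ [c]).length : Nat) : Int), (((seg ++ [c]).count 'O' : Nat) : Int), res) := by
        by_cases ho : c = 'O'
        · subst ho
          simp only [pvStepA]
          norm_num [hc]
          omega
        · simp only [pvStepA]
          norm_num [hc, ho]
          omega
      rw [hstep]
      push_cast
      have hb : i + ((t'.length : Int) + 1) - 1 = (i + 1) + t'.length - 1 := by ring
      rw [hb]
      have hrec := ih (seg ++ [c]) (i + 1) res
      simp only [pvRun] at hrec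
      push_cast at hrec
      rw [hrec]
      rw [pvSplit_cons c t' hc]
      cases h : pvSplit t' with
      | nil => exact absurd h (pvSplit_ne_nil t')
      | cons a b => simp [List.modifyHead, List.append_assoc]

theorem pvIntercalate_nil_flatten {α : Type} (L : List (List α)) :
    List.intercalate ([] : List α) L = L.flatten := by
  induction L with
  | nil => simp [List.intercalate]
  | cons x xs ih =>
    cases xs with
    | nil => simp [List.intercalate]
    | cons y ys =>
      rw [pvIntercalate_cons, ih]
      simp

-- ===== VERDICT (by name: the statement is the Claim_ definition above) =====
theorem moveRockColumn_spec : Claim_equal_moveRockColumn := by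
  intro column _
  unfold Spec_moveRockColumn
  -- A side
  rw [moveRockColumn]
  have hA := pvMainA column.toList [] 0 []
  simp only [pvRun, List.length_nil, Nat.cast_zero, List.count_nil, CharP.cast_eq_zero] at hA
  rw [pvModifyHead_nil] at hA
  -- B side
  rw [moveRockColumn_alt]
  have hsegs : (PySem.Str.split? column "#").getD [] = (pvSplit column.toList).map String.ofList := by
    rw [PySem.Str.split?, PySem.Chars.split?]
    simp [pvSplitOn_eq]
  rw [hsegs]
  rw [PySem.Str.join, PySem.Str.join]
  congr 1
  rw [PySem.Chars.join, PySem.Chars.join]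
  have hparts : (((pvSplit column.toList).map String.ofList).map (fun seg =>
        String.ofList (List.replicate (PySem.Str.count seg "O") 'O' ++
          List.replicate (seg.toList.length - PySem.Str.count seg "O") '.'))).map String.toList =
      (pvSplit column.toList).map pvSeg := by
    simp only [List.map_map]
    apply List.map_congr_left
    intro cs _
    simp only [Function.comp]
    rw [PySem.Str.count_eq]
    simp only [String.toList_ofList]
    rw [show ("O" : String).toList = ['O'] from rfl, pvCount_char]
    rw [pvSeg]
  rw [hparts]
  rw [show ("" : String).toList = ([] : List Char) from rfl,
      show ("#" : String).toList = ['#'] from rfl]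
  rw [pvIntercalate_nil_flatten]
  have hlen : PySem.Str.len column - 1 = 0 + (column.toList.length : Int) - 1 := by
    rw [PySem.Str.len]; ring
  rw [hlen]
  simp only [pvChars, List.map_nil, List.flatten_nil, List.nil_append] at hA
  exact hA
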